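-- pv_equiv track=rewrite | github.com/lstrazza/Skincare_App | Final_App.py | match_description_to_topic
-- ===== SOURCE A (Python) =====
-- def match_description_to_topic(user_description, key_tags, key_topics):
--     user_words = user_description.lower().split()
--     matched_tags = [tag for tag in key_tags if tag in user_words]
--
--     topic_scores = []
--     for i, topic in enumerate(key_topics):
--         _, keywords = list(topic.items())[0]
--         score = sum(weight for word, weight in keywords if word in matched_tags)
--         topic_scores.append((i, score))
--
--     topic_scores.sort(key=lambda x: x[1], reverse=True)
--     best_topic_index = topic_scores[0][0] if topic_scores else None
--     return best_topic_index, matched_tags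
-- ===== SOURCE B (Python) =====
-- def match_description_to_topic(user_description, key_tags, key_topics):
--     user_words = set(user_description.lower().split())
--     matched_tags = [tag for tag in key_tags if tag in user_words]
--     matched = set(matched_tags)
--
--     # inverted index: word -> list of (topic_index, weight) postings
--     index = {}
--     for i, topic in enumerate(key_topics):
--         keywords = next(iter(topic.values()))
--         for word, weight in keywords:
--             index[word] = index.get(word, []) + [(i, weight)]
--
--     # scatter-add each matched word's postings into the score table
--     scores = [0] * len(key_topics)
--     for word, postings in index.items():
--         if word in matched:
--             for i, weight in postings:
--                 scores[i] += weight
--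
--     best_topic_index = scores.index(max(scores)) if scores else None
--     return best_topic_index, matched_tags
-- ===== Notes on version B (the rewrite author's own statement) =====
-- stated objective: alternative
-- what changed: A rescans the matched-tag list for every keyword of every topic, then stable-sorts all (index, score) pairs descending and takes the head; B builds an inverted word->postings index in one pass, scatter-adds each matched word's postings into a score table, and takes the first index of the running maximum with scores.index(max(scores)) - no sort, no per-topic membership rescans.
import Mathlib
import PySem

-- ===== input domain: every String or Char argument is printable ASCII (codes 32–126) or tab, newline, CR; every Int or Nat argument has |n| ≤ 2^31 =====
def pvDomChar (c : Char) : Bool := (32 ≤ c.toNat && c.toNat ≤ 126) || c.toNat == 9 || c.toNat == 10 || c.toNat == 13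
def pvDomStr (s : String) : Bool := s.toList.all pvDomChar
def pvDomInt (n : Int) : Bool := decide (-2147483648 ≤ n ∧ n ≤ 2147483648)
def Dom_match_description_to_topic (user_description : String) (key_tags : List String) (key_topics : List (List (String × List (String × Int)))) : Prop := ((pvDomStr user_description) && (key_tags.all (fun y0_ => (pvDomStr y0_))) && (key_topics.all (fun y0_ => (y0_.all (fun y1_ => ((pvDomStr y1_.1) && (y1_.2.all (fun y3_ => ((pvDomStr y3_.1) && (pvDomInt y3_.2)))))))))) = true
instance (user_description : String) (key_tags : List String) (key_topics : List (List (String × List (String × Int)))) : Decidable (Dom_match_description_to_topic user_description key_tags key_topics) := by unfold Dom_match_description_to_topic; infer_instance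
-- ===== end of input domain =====

-- B replaces A's per-topic rescans + full descending sort by an inverted word index,
-- one scatter-add pass over the matched words, and a single running max/index lookup
-- (objective: alternative algorithm of similar cost).

-- ===== PORT A =====
-- Literal port of A.  `list(topic.items())[0]` raises IndexError on an empty dict: those
-- inputs are excluded by Pre_; the port reads the first item through pyGetD with an unused
-- default there.
def match_description_to_topic (user_description : String) (key_tags : List String) (key_topics : List (List (String × List (String × Int)))) : Option Int × List String :=
  let user_words := PySem.Str.split₀ (PySem.Str.lower user_description)
  let matched_tags := key_tags.filter (fun tag => user_words.contains tag)
  let topic_scores := (PySem.List.enumerate key_topics 0).foldl (fun acc p =>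
      let kws := (PySem.List.pyGetD (PySem.Dict.ofList p.2).items 0 ("", [])).2
      let score := ((kws.filter (fun wv => matched_tags.contains wv.1)).map (fun wv => wv.2)).sum
      acc ++ [(p.1, score)]) []
  let ts := PySem.List.sorted topic_scores (fun x => x.2) true
  (match ts with | [] => none | h :: _ => some h.1, matched_tags)

-- ===== PORT B =====
-- Literal port of Source B.  `next(iter(topic.values()))` raises StopIteration on an empty
-- dict (outside Pre_, unused default); `scores.index(max(scores))` always finds its
-- argument, the `.getD 0` only totalises the Option.
def match_description_to_topic_alt (user_description : String) (key_tags : List String) (key_topics : List (List (String × List (String × Int)))) : Option Int × List String :=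
  let user_words : PySem.Set String := PySem.Set.ofList (PySem.Str.split₀ (PySem.Str.lower user_description))
  let matched_tags := key_tags.filter (fun tag => PySem.Set.contains user_words tag)
  let matched : PySem.Set String := PySem.Set.ofList matched_tags
  let index := (PySem.List.enumerate key_topics 0).foldl (fun d p =>
      (PySem.List.pyGetD (PySem.Dict.ofList p.2).values 0 []).foldl
        (fun d wv => d.insert wv.1 (d.getD wv.1 [] ++ [(p.1, wv.2)])) d)
    PySem.Dict.empty
  let scores := index.items.foldl (fun sc it =>
      if PySem.Set.contains matched it.1 then
        it.2.foldl (fun sc pw => PySem.List.pySetD sc pw.1 (PySem.List.pyGetD sc pw.1 0 + pw.2)) sc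
      else sc)
    (List.replicate key_topics.length (0 : Int))
  let best := match scores with
    | [] => none
    | s0 :: rest => some (((PySem.List.index? scores (rest.foldl max s0)).getD 0 : Nat) : Int)
  (best, matched_tags)

-- ===== PRECONDITION & SPEC =====
-- Pre_ excludes only inputs on which Python A raises: a topic that is an empty dict
-- (IndexError on list(topic.items())[0]).
def Pre_match_description_to_topic (user_description : String) (key_tags : List String) (key_topics : List (List (String × List (String × Int)))) : Prop :=
  ∀ t ∈ key_topics, t ≠ []
instance (user_description : String) (key_tags : List String) (key_topics : List (List (String × List (String × Int)))) : Decidable (Pre_match_description_to_topic user_description key_tags key_topics) := by unfold Pre_match_description_to_topic; infer_instance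

def pvWitness_match_description_to_topic : String × List String × (List (List (String × List (String × Int)))) :=
  ("dry skin here", ["skin", "oily"], [[("acne", [("skin", 2), ("oily", 1)])], [("dry", [("dry", 3)])]])

def Spec_match_description_to_topic (user_description : String) (key_tags : List String) (key_topics : List (List (String × List (String × Int)))) (out : Option Int × List String) : Prop := out = match_description_to_topic_alt user_description key_tags key_topics
instance (user_description : String) (key_tags : List String) (key_topics : List (List (String × List (String × Int)))) (out : Option Int × List String) : Decidable (Spec_match_description_to_topic user_description key_tags key_topics out) := by unfold Spec_match_description_to_topic; infer_instance

-- ===== CLAIM (what is proved, stated in full; the proofs are below) =====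
def Claim_equal_match_description_to_topic : Prop := ∀ (user_description : String) (key_tags : List String) (key_topics : List (List (String × List (String × Int)))), Dom_match_description_to_topic user_description key_tags key_topics → Pre_match_description_to_topic user_description key_tags key_topics → Spec_match_description_to_topic user_description key_tags key_topics (match_description_to_topic user_description key_tags key_topics)

-- ===== LEMMAS AND PROOFS =====

-- proof-side vocabulary
def pvKw (t : List (String × List (String × Int))) : List (String × Int) :=
  (PySem.List.pyGetD (PySem.Dict.ofList t).items 0 ("", [])).2

def pvScore (mt : List String) (t : List (String × List (String × Int))) : Int :=
  (((pvKw t).filter (fun wv => mt.contains wv.1)).map (fun wv => wv.2)).sum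

def pvEntries (kts : List (List (String × List (String × Int)))) : List (String × Int × Int) :=
  (PySem.List.enumerate kts 0).flatMap (fun p => (pvKw p.2).map (fun wv => (wv.1, p.1, wv.2)))

def pvHeadA (ts : List (Int × Int)) : Option Int :=
  match PySem.List.sorted ts (fun x => x.2) true with | [] => none | h :: _ => some h.1

def pvHeadB (ss : List Int) : Option Int :=
  match ss with
  | [] => none
  | s0 :: rest => some (((PySem.List.index? ss (rest.foldl max s0)).getD 0 : Nat) : Int)

def pvMaxOf : List Int → Int
  | [] => 0
  | s0 :: rest => rest.foldl max s0

-- set membership test = list membership test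
lemma pv_set_contains (xs : List String) (y : String) :
    PySem.Set.contains (PySem.Set.ofList xs) y = xs.contains y := by
  simp only [PySem.Set.contains]
  rw [Bool.eq_iff_iff]
  simp only [List.contains_iff_mem]
  exact PySem.Set.mem_ofList xs y

-- B's first-value read = A's first-item read
lemma pv_values_head (t : List (String × List (String × Int))) :
    PySem.List.pyGetD (PySem.Dict.ofList t).values 0 [] = pvKw t := by
  have h := PySem.List.pyGetD_map (fun p : String × List (String × Int) => p.2)
      (PySem.Dict.ofList t).items 0 ("", [])
  simpa [PySem.Dict.values, pvKw] using h

-- the nested build loop is the flat fold over the entry stream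
lemma pv_build_flat (l : List (Int × List (String × List (String × Int))))
    (d : PySem.Dict String (List (Int × Int))) :
    l.foldl (fun d p =>
        (pvKw p.2).foldl
          (fun d wv => d.insert wv.1 (d.getD wv.1 [] ++ [(p.1, wv.2)])) d) d
    = (l.flatMap (fun p => (pvKw p.2).map (fun wv => (wv.1, p.1, wv.2)))).foldl
        (fun d e => d.insert e.1 (d.getD e.1 [] ++ [e.2])) d := by
  induction l generalizing d with
  | nil => rfl
  | cons p l ih =>
      simp only [List.foldl_cons, List.flatMap_cons, List.foldl_append, List.foldl_map]
      exact ih _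

-- value lists accumulated by the build fold
lemma pv_getD_build (es : List (String × Int × Int)) :
    ∀ (d : PySem.Dict String (List (Int × Int))) (w : String),
      (es.foldl (fun d e => d.insert e.1 (d.getD e.1 [] ++ [e.2])) d).getD w []
      = d.getD w [] ++ (es.filter (fun e => e.1 == w)).map (fun e => e.2) := by
  induction es with
  | nil => intro d w; simp
  | cons e es ih =>
      intro d w
      rw [List.foldl_cons, ih]
      by_cases he : e.1 = w
      · subst he
        simp [PySem.Dict.getD_insert_self, List.append_assoc]
      · simp [he, PySem.Dict.getD_insert_of_ne _ _ _ (Ne.symm he)]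

-- keys of the build fold
lemma pv_keys_build (es : List (String × Int × Int)) :
    (es.foldl (fun d e => d.insert e.1 (d.getD e.1 [] ++ [e.2]))
        (PySem.Dict.empty : PySem.Dict String (List (Int × Int)))).keys
      = PySem.Set.ofList (es.map (fun e => e.1)) := by
  have h := PySem.Dict.keys_foldl_insert_key es (fun e => e.1)
      (fun d e => d.getD e.1 [] ++ [e.2])
      (PySem.Dict.empty : PySem.Dict String (List (Int × Int)))
  simp only [] at h
  rw [h, PySem.Set.ofList_eq_foldl]
  rfl

lemma pv_nodup_keys_build (es : List (String × Int × Int)) :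
    (es.foldl (fun d e => d.insert e.1 (d.getD e.1 [] ++ [e.2]))
        (PySem.Dict.empty : PySem.Dict String (List (Int × Int)))).keys.Nodup := by
  have h := PySem.Dict.nodup_keys_foldl_insert_key es (fun e => e.1)
      (fun d e => d.getD e.1 [] ++ [e.2])
      (PySem.Dict.empty : PySem.Dict String (List (Int × Int))) (by exact List.nodup_nil)
  simpa using h

-- single scatter-add pass over one posting list
lemma pv_apply_get (ps : List (Int × Int)) :
    ∀ (sc : List Int) (j : Nat) (hj : j < sc.length), (∀ pw ∈ ps, 0 ≤ pw.1) →
      (ps.foldl (fun sc pw => PySem.List.pySetD sc pw.1 (PySem.List.pyGetD sc pw.1 0 + pw.2)) sc)[j]?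
      = some (sc[j] + (ps.map (fun pw => if pw.1 = (j : Int) then pw.2 else 0)).sum) := by
  induction ps with
  | nil => intro sc j hj _; simp [List.getElem?_eq_getElem hj]
  | cons pw ps ih =>
      intro sc j hj hpos
      have h0 : 0 ≤ pw.1 := hpos pw List.mem_cons_self
      obtain ⟨k, hk⟩ : ∃ k : Nat, pw.1 = (k : Int) := ⟨pw.1.toNat, (Int.toNat_of_nonneg h0).symm⟩
      simp only [List.foldl_cons]
      rw [hk, PySem.List.pySetD_natCast, PySem.List.pyGetD_natCast]
      rw [ih (sc.set k (sc.getD k 0 + pw.2)) j (by simpa using hj)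
        (fun q hq => hpos q (List.mem_cons_of_mem _ hq))]
      simp only [List.map_cons, List.sum_cons, hk]
      by_cases hkj : k = j
      · subst hkj
        rw [List.getElem_set_self, List.getD_eq_getElem?_getD, List.getElem?_eq_getElem hj,
          Option.getD_some, if_pos rfl, add_assoc]
      · rw [List.getElem_set_ne hkj, if_neg (by omega), zero_add]

lemma pv_apply_len (ps : List (Int × Int)) :
    ∀ (sc : List Int),
      (ps.foldl (fun sc pw => PySem.List.pySetD sc pw.1 (PySem.List.pyGetD sc pw.1 0 + pw.2)) sc).length = sc.length := by
  induction ps with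
  | nil => intro sc; rfl
  | cons pw ps ih => intro sc; rw [List.foldl_cons, ih, PySem.List.length_pySetD]

lemma pv_scatter_len (q : String → Bool) (its : List (String × List (Int × Int))) :
    ∀ (sc : List Int),
      (its.foldl (fun sc it =>
          if q it.1 then
            it.2.foldl (fun sc pw => PySem.List.pySetD sc pw.1 (PySem.List.pyGetD sc pw.1 0 + pw.2)) sc
          else sc) sc).length = sc.length := by
  induction its with
  | nil => intro sc; rfl
  | cons it its ih =>
      intro sc
      rw [List.foldl_cons, ih]
      by_cases h : q it.1 <;> simp [h, pv_apply_len]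

-- the scatter loop computes a per-position sum
lemma pv_scatter_get (q : String → Bool) (its : List (String × List (Int × Int))) :
    ∀ (sc : List Int) (j : Nat) (hj : j < sc.length),
      (∀ it ∈ its, ∀ pw ∈ it.2, 0 ≤ pw.1) →
      (its.foldl (fun sc it =>
          if q it.1 then
            it.2.foldl (fun sc pw => PySem.List.pySetD sc pw.1 (PySem.List.pyGetD sc pw.1 0 + pw.2)) sc
          else sc) sc)[j]?
      = some (sc[j] + (its.map (fun it =>
          if q it.1 then (it.2.map (fun pw => if pw.1 = (j : Int) then pw.2 else 0)).sum else 0)).sum) := by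
  induction its with
  | nil => intro sc j hj _; simp [List.getElem?_eq_getElem hj]
  | cons it its ih =>
      intro sc j hj hpos
      simp only [List.foldl_cons, List.map_cons, List.sum_cons]
      by_cases h : q it.1
      · have hg := pv_apply_get it.2 sc j hj (hpos it List.mem_cons_self)
        set sc' := it.2.foldl (fun sc pw => PySem.List.pySetD sc pw.1 (PySem.List.pyGetD sc pw.1 0 + pw.2)) sc with hsc'
        have hlen : sc'.length = sc.length := pv_apply_len _ _
        have hj' : j < sc'.length := by omega
        have hval : sc'[j] = sc[j] + (it.2.map (fun pw => if pw.1 = (j : Int) then pw.2 else 0)).sum := by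
          have h2 := List.getElem?_eq_getElem hj'
          rw [h2] at hg
          exact Option.some.inj hg
        rw [if_pos h, ih sc' j hj' (fun x hx => hpos x (List.mem_cons_of_mem _ hx)), hval,
          if_pos h, add_assoc]
      · rw [if_neg h, ih sc j hj (fun x hx => hpos x (List.mem_cons_of_mem _ hx)), if_neg h,
          zero_add]

-- filtered-map sum as a guarded sum
lemma pv_filter_map_sum {α : Type} (l : List α) (p : α → Bool) (f : α → Int) :
    ((l.filter p).map f).sum = (l.map (fun x => if p x then f x else 0)).sum := by
  induction l with
  | nil => rfl
  | cons x l ih => by_cases h : p x <;> simp [h, ih]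

-- sum over a flatMap
lemma pv_sum_flatMap {α β : Type} (l : List α) (f : α → List β) (g : β → Int) :
    ((l.flatMap f).map g).sum = (l.map (fun x => ((f x).map g).sum)).sum := by
  induction l with
  | nil => rfl
  | cons x l ih => simp [List.flatMap_cons, ih]

-- restricting to entries of other keys
lemma pv_filter_sub (es : List (String × Int × Int)) (w' w : String) (h : w' ≠ w) :
    (es.filter (fun e => e.1 == w'))
      = ((es.filter (fun e => !(e.1 == w))).filter (fun e => e.1 == w')) := by
  induction es with
  | nil => rfl
  | cons e es ih =>
      by_cases h2 : e.1 = w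
      · have hbw : (e.1 == w) = true := by simp [h2]
        have hbw' : (e.1 == w') = false := by
          rw [h2]; exact beq_eq_false_iff_ne.mpr (Ne.symm h)
        simp [hbw, hbw', ih]
      · have hbw : (e.1 == w) = false := beq_eq_false_iff_ne.mpr h2
        by_cases h1 : e.1 = w'
        · have hbw' : (e.1 == w') = true := by simp [h1]
          simp [hbw, hbw', ih]
        · have hbw' : (e.1 == w') = false := beq_eq_false_iff_ne.mpr h1
          simp [hbw, hbw', ih]

-- grouping a sum by (distinct) keys
lemma pv_fiber_sum (ws : List String) (hnd : ws.Nodup) :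
    ∀ (es : List (String × Int × Int)) (g : String × Int × Int → Int),
      (∀ e ∈ es, e.1 ∈ ws) →
      (ws.map (fun w => ((es.filter (fun e => e.1 == w)).map g).sum)).sum = (es.map g).sum := by
  induction ws with
  | nil =>
      intro es g hcov
      cases es with
      | nil => rfl
      | cons e es => exact (List.not_mem_nil (hcov e List.mem_cons_self)).elim
  | cons w ws ih =>
      intro es g hcov
      obtain ⟨hw, hnd'⟩ := List.nodup_cons.mp hnd
      simp only [List.map_cons, List.sum_cons]
      have hmc : ∀ w' ∈ ws,
          ((es.filter (fun e => e.1 == w')).map g).sum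
            = (((es.filter (fun e => !(e.1 == w))).filter (fun e => e.1 == w')).map g).sum := by
        intro w' hw'
        rw [← pv_filter_sub es w' w (fun hh => hw (hh ▸ hw'))]
      rw [List.map_congr_left hmc, ih hnd' (es.filter (fun e => !(e.1 == w))) g ?hcov]
      · have hp := (List.filter_append_perm (fun e : String × Int × Int => e.1 == w) es).map g
        have hs := hp.sum_eq
        simp only [List.map_append, List.sum_append] at hs
        exact hs
      · intro e he
        have he1 := List.mem_filter.mp he
        have : e.1 ∈ w :: ws := hcov e he1.1
        rcases List.mem_cons.mp this with h1 | h1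
        · exfalso; rw [h1] at he1; simp at he1
        · exact h1

-- a topic's contribution picked out of the enumerate sum
lemma pv_enum_pick {α : Type} (xs : List α) (F : α → Int) :
    ∀ (s : Int) (j : Nat), (hj : j < xs.length) →
      ((PySem.List.enumerate xs s).map (fun p => if p.1 = s + (j : Int) then F p.2 else 0)).sum
        = F xs[j] := by
  induction xs with
  | nil => intro s j hj; simp at hj
  | cons x xs ih =>
      intro s j hj
      rw [PySem.List.enumerate_cons]
      cases j with
      | zero =>
          simp only [List.map_cons, List.sum_cons, Nat.cast_zero, add_zero]
          have hz : ∀ p ∈ PySem.List.enumerate xs (s + 1),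
              (if p.1 = s then F p.2 else 0) = (0 : Int) := by
            intro p hp
            obtain ⟨k, hk, rfl⟩ := (PySem.List.mem_enumerate_iff xs (s + 1) p).mp hp
            rw [if_neg (by omega)]
          rw [List.map_congr_left hz]
          simp
      | succ j =>
          simp only [List.map_cons, List.sum_cons]
          rw [if_neg (by push_cast; omega)]
          have harith : s + ((j + 1 : Nat) : Int) = (s + 1) + (j : Int) := by push_cast; ring
          rw [show (fun p : Int × α => if p.1 = s + ((j + 1 : Nat) : Int) then F p.2 else 0)
              = (fun p : Int × α => if p.1 = (s + 1) + (j : Int) then F p.2 else 0) from by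
            funext p; rw [harith]]
          rw [ih (s + 1) j (by simp only [List.length_cons] at hj; omega)]
          simp

-- every entry's position is a topic index
lemma pv_entries_pos (kts : List (List (String × List (String × Int)))) :
    ∀ e ∈ pvEntries kts, ∃ k : Nat, k < kts.length ∧ e.2.1 = (k : Int) := by
  intro e he
  obtain ⟨p, hp, he2⟩ := List.mem_flatMap.mp he
  obtain ⟨wv, _, rfl⟩ := List.mem_map.mp he2
  obtain ⟨k, hk, rfl⟩ := (PySem.List.mem_enumerate_iff kts 0 p).mp hp
  exact ⟨k, hk, by simp⟩

-- one fiber's guarded sum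
lemma pv_contrib (mt : List String) (es : List (String × Int × Int)) (j : Nat) (w : String) :
    (if mt.contains w then
        (((es.filter (fun e => e.1 == w)).map (fun e => e.2)).map
          (fun pw => if pw.1 = (j : Int) then pw.2 else 0)).sum
      else 0)
    = ((es.filter (fun e => e.1 == w)).map
        (fun e => if mt.contains e.1 then (if e.2.1 = (j : Int) then e.2.2 else 0) else 0)).sum := by
  have hkey : ∀ e ∈ es.filter (fun e => e.1 == w), e.1 = w := by
    intro e he
    have := (List.mem_filter.mp he).2
    simpa using this
  by_cases hw : w ∈ mt
  · have hwc : mt.contains w = true := by simpa using hw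
    rw [if_pos hwc, List.map_map]
    refine congrArg List.sum (List.map_congr_left fun e he => ?_)
    show (if e.2.1 = (j : Int) then e.2.2 else 0)
        = if mt.contains e.1 then (if e.2.1 = (j : Int) then e.2.2 else 0) else 0
    rw [hkey e he, if_pos hwc]
  · have hwc : mt.contains w = false := by simpa using hw
    rw [if_neg (by rw [hwc]; exact Bool.false_ne_true)]
    have hz : ∀ e ∈ es.filter (fun e => e.1 == w),
        (if mt.contains e.1 then (if e.2.1 = (j : Int) then e.2.2 else 0) else 0) = (0 : Int) := by
      intro e he
      rw [hkey e he, hwc]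
      simp
    rw [List.map_congr_left hz]
    simp

-- the scatter output IS A's per-topic score table
lemma pv_scores (mt : List String) (kts : List (List (String × List (String × Int)))) :
    ((pvEntries kts).foldl (fun d e => d.insert e.1 (d.getD e.1 [] ++ [e.2]))
        (PySem.Dict.empty : PySem.Dict String (List (Int × Int)))).items.foldl
      (fun sc it =>
        if mt.contains it.1 then
          it.2.foldl (fun sc pw => PySem.List.pySetD sc pw.1 (PySem.List.pyGetD sc pw.1 0 + pw.2)) sc
        else sc)
      (List.replicate kts.length (0 : Int))
    = kts.map (pvScore mt) := by
  set es := pvEntries kts with hes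
  set d := (es.foldl (fun d e => d.insert e.1 (d.getD e.1 [] ++ [e.2]))
      (PySem.Dict.empty : PySem.Dict String (List (Int × Int)))) with hd
  have hitems : d.items = (PySem.Set.ofList (es.map (fun e => e.1))).map
      (fun w => (w, (es.filter (fun e => e.1 == w)).map (fun e => e.2))) := by
    rw [PySem.Dict.items_eq_map_keys d (pv_nodup_keys_build es) [], pv_keys_build]
    refine List.map_congr_left fun w _ => ?_
    rw [hd, pv_getD_build]
    simp
  have hpos : ∀ it ∈ d.items, ∀ pw ∈ it.2, 0 ≤ pw.1 := by
    rw [hitems]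
    intro it hit pw hpw
    obtain ⟨w, _, rfl⟩ := List.mem_map.mp hit
    obtain ⟨e, hef, rfl⟩ := List.mem_map.mp hpw
    obtain ⟨k, _, hk⟩ := pv_entries_pos kts e (hes ▸ List.mem_of_mem_filter hef)
    rw [hk]; omega
  apply List.ext_getElem
  · rw [pv_scatter_len, List.length_replicate, List.length_map]
  · intro j hj1 hj2
    rw [pv_scatter_len, List.length_replicate] at hj1
    have hg := pv_scatter_get (fun w => mt.contains w) d.items
        (List.replicate kts.length (0 : Int)) j (by simpa using hj1) hpos
    rw [List.getElem?_eq_getElem (by rw [pv_scatter_len, List.length_replicate]; exact hj1)] at hg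
    have hval := Option.some.inj hg
    rw [hval, List.getElem_replicate, zero_add]
    rw [hitems, List.map_map]
    have hcomp : ((fun it : String × List (Int × Int) =>
          if mt.contains it.1 then (it.2.map (fun pw => if pw.1 = (j : Int) then pw.2 else 0)).sum else 0)
        ∘ (fun w => (w, (es.filter (fun e => e.1 == w)).map (fun e => e.2))))
        = fun w => (if mt.contains w then
            (((es.filter (fun e => e.1 == w)).map (fun e => e.2)).map
              (fun pw => if pw.1 = (j : Int) then pw.2 else 0)).sum else 0) := rfl
    rw [hcomp]
    have h1 : ∀ w ∈ PySem.Set.ofList (es.map (fun e => e.1)),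
        (if mt.contains w then
            (((es.filter (fun e => e.1 == w)).map (fun e => e.2)).map
              (fun pw => if pw.1 = (j : Int) then pw.2 else 0)).sum else 0)
        = ((es.filter (fun e => e.1 == w)).map
            (fun e => if mt.contains e.1 then (if e.2.1 = (j : Int) then e.2.2 else 0) else 0)).sum :=
      fun w _ => pv_contrib mt es j w
    rw [List.map_congr_left h1,
      pv_fiber_sum _ (PySem.Set.nodup_ofList _) es _ ?hcov]
    · -- sum over all entries, regrouped per topic
      rw [hes]
      unfold pvEntries
      rw [pv_sum_flatMap]
      have h2 : ∀ p ∈ PySem.List.enumerate kts 0,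
          (((pvKw p.2).map (fun wv => (wv.1, p.1, wv.2))).map
            (fun e => if mt.contains e.1 then (if e.2.1 = (j : Int) then e.2.2 else 0) else 0)).sum
          = (if p.1 = 0 + (j : Int) then pvScore mt p.2 else 0) := by
        intro p _
        rw [List.map_map]
        by_cases hpj : p.1 = (j : Int)
        · rw [if_pos (by omega)]
          unfold pvScore
          rw [pv_filter_map_sum]
          refine congrArg List.sum (List.map_congr_left fun wv _ => ?_)
          by_cases hm : mt.contains wv.1 <;> simp [Function.comp, hpj]
        · rw [if_neg (by omega)]
          have : ∀ wv ∈ pvKw p.2,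
              ((fun e : String × Int × Int =>
                  if mt.contains e.1 then (if e.2.1 = (j : Int) then e.2.2 else 0) else 0)
                ∘ (fun wv => (wv.1, p.1, wv.2))) wv = 0 := by
            intro wv _
            by_cases hm : mt.contains wv.1 <;> simp [Function.comp, hpj]
          rw [List.map_congr_left this]
          simp
      rw [List.map_congr_left h2, pv_enum_pick kts (pvScore mt) 0 j hj1]
      simp
    case hcov =>
      intro e he
      rw [PySem.Set.mem_ofList]
      exact List.mem_map.mpr ⟨e, he, rfl⟩

-- A's score table, written as a plain map
lemma pv_enum_map {α β : Type} (xs : List α) (F : α → β) :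
    ∀ s : Int, (PySem.List.enumerate xs s).map (fun p => (p.1, F p.2))
      = PySem.List.enumerate (xs.map F) s := by
  induction xs with
  | nil => intro s; rfl
  | cons x xs ih => intro s; simp [PySem.List.enumerate_cons, ih]

lemma pv_ts (mt : List String) (kts : List (List (String × List (String × Int)))) :
    (PySem.List.enumerate kts 0).foldl (fun acc p => acc ++ [(p.1, pvScore mt p.2)]) []
      = PySem.List.enumerate (kts.map (pvScore mt)) 0 := by
  rw [PySem.List.foldl_append_singleton_eq_map, List.nil_append, pv_enum_map]

-- max facts
lemma pv_maxOf_le (ss : List Int) : ∀ y ∈ ss, y ≤ pvMaxOf ss := by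
  cases ss with
  | nil => intro y hy; simp at hy
  | cons s0 rest =>
      intro y hy
      rcases List.mem_cons.mp hy with h | h
      · rw [h]; exact (PySem.List.le_foldl_max rest s0).1
      · exact (PySem.List.le_foldl_max rest s0).2 y h

lemma pv_maxOf_mem (ss : List Int) (h : ss ≠ []) : pvMaxOf ss ∈ ss := by
  cases ss with
  | nil => exact absurd rfl h
  | cons s0 rest =>
      rcases PySem.List.foldl_max_mem rest s0 with h1 | h1
      · rw [pvMaxOf, h1]; exact List.mem_cons_self
      · exact List.mem_cons_of_mem _ h1

lemma pv_maxOf_snoc (ss : List Int) (v : Int) (h : ss ≠ []) :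
    pvMaxOf (ss ++ [v]) = max (pvMaxOf ss) v := by
  cases ss with
  | nil => exact absurd rfl h
  | cons s0 rest => simp [pvMaxOf, List.foldl_append]

-- one snoc step of the stable descending sort
lemma pv_sorted_snoc (l : List (Int × Int)) (x : Int × Int) :
    PySem.List.sorted (l ++ [x]) (fun p => p.2) true
      = PySem.List.insertBy (fun a b => decide (b.2 < a.2)) x
          (PySem.List.sorted l (fun p => p.2) true) := by
  rw [PySem.List.sorted_rev_eq_foldl_insertBy, PySem.List.sorted_rev_eq_foldl_insertBy,
    List.foldl_append]
  rfl

-- head of the stable descending sort = first index of the maximum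
lemma pv_head_max (ss : List Int) : ss ≠ [] →
    ∃ (k : Nat) (t : List (Int × Int)),
      PySem.List.index? ss (pvMaxOf ss) = some k ∧
      PySem.List.sorted (PySem.List.enumerate ss 0) (fun p => p.2) true
        = ((k : Int), pvMaxOf ss) :: t := by
  induction ss using List.reverseRecOn with
  | nil => intro h; exact absurd rfl h
  | append_singleton l v ih =>
      intro _
      by_cases hlne : l = []
      · subst hlne
        refine ⟨0, [], ?_, ?_⟩
        · rw [List.nil_append, show pvMaxOf [v] = v from rfl]
          exact PySem.List.index?_cons_self v []
        · rw [List.nil_append, PySem.List.sorted_rev_eq_foldl_insertBy]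
          simp [pvMaxOf, PySem.List.enumerate_cons, PySem.List.enumerate_nil,
            PySem.List.insertBy]
      · obtain ⟨k, t, hidx, hsor⟩ := ih hlne
        have henum : PySem.List.enumerate (l ++ [v]) 0
            = PySem.List.enumerate l 0 ++ [((l.length : Int), v)] := by
          rw [PySem.List.enumerate_append, PySem.List.enumerate_cons, PySem.List.enumerate_nil]
          simp
        have hsor2 : PySem.List.sorted (PySem.List.enumerate (l ++ [v]) 0) (fun p => p.2) true
            = PySem.List.insertBy (fun a b => decide (b.2 < a.2)) ((l.length : Int), v)
                (((k : Int), pvMaxOf l) :: t) := by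
          rw [henum, pv_sorted_snoc, hsor]
        by_cases hlt : pvMaxOf l < v
        · have hmax : pvMaxOf (l ++ [v]) = v := by
            rw [pv_maxOf_snoc l v hlne]; omega
          have hnot : v ∉ l := fun hv => absurd (pv_maxOf_le l v hv) (by omega)
          refine ⟨l.length, ((k : Int), pvMaxOf l) :: t, ?_, ?_⟩
          · rw [hmax, PySem.List.index?_append_singleton_self l v hnot]
          · rw [hsor2, hmax]
            simp [PySem.List.insertBy, hlt]
        · have hmax : pvMaxOf (l ++ [v]) = pvMaxOf l := by
            rw [pv_maxOf_snoc l v hlne]; omega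
          refine ⟨k, PySem.List.insertBy (fun a b => decide (b.2 < a.2)) ((l.length : Int), v) t,
            ?_, ?_⟩
          · rw [hmax, PySem.List.index?_append_of_mem [v] (pv_maxOf_mem l hlne), hidx]
          · rw [hsor2, hmax]
            simp [PySem.List.insertBy, hlt]

lemma pv_headAB (ss : List Int) : pvHeadA (PySem.List.enumerate ss 0) = pvHeadB ss := by
  cases ss with
  | nil => rfl
  | cons s0 rest =>
      obtain ⟨k, t, hidx, hsor⟩ := pv_head_max (s0 :: rest) (List.cons_ne_nil _ _)
      unfold pvHeadA pvHeadB
      rw [hsor]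
      show some ((k : Nat) : Int)
          = some (((PySem.List.index? (s0 :: rest) (rest.foldl max s0)).getD 0 : Nat) : Int)
      have hm : pvMaxOf (s0 :: rest) = rest.foldl max s0 := rfl
      rw [hm] at hidx
      rw [hidx]
      rfl

-- ===== VERDICT (by name: the statement is the Claim_ definition above) =====
theorem match_description_to_topic_spec : Claim_equal_match_description_to_topic := by
  intro ud ktags kts _ _
  unfold Spec_match_description_to_topic
  have hA : match_description_to_topic ud ktags kts
      = (pvHeadA (List.foldl
          (fun acc p => acc ++ [(p.1, pvScore (ktags.filter
            (fun tag => (PySem.Str.split₀ (PySem.Str.lower ud)).contains tag)) p.2)])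
          [] (PySem.List.enumerate kts 0)),
         ktags.filter (fun tag => (PySem.Str.split₀ (PySem.Str.lower ud)).contains tag)) := rfl
  have hB : match_description_to_topic_alt ud ktags kts
      = (pvHeadB (List.foldl
          (fun sc it =>
            if PySem.Set.contains (PySem.Set.ofList (ktags.filter (fun tag =>
                PySem.Set.contains (PySem.Set.ofList (PySem.Str.split₀ (PySem.Str.lower ud))) tag))) it.1 then
              it.2.foldl (fun sc pw => PySem.List.pySetD sc pw.1 (PySem.List.pyGetD sc pw.1 0 + pw.2)) sc
            else sc)
          (List.replicate kts.length (0 : Int))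
          (List.foldl (fun d p =>
              (PySem.List.pyGetD (PySem.Dict.ofList p.2).values 0 []).foldl
                (fun d wv => d.insert wv.1 (d.getD wv.1 [] ++ [(p.1, wv.2)])) d)
            PySem.Dict.empty (PySem.List.enumerate kts 0)).items),
         ktags.filter (fun tag =>
            PySem.Set.contains (PySem.Set.ofList (PySem.Str.split₀ (PySem.Str.lower ud))) tag)) := rfl
  rw [hA, hB]
  have hmt : ktags.filter (fun tag =>
      PySem.Set.contains (PySem.Set.ofList (PySem.Str.split₀ (PySem.Str.lower ud))) tag)
      = ktags.filter (fun tag => (PySem.Str.split₀ (PySem.Str.lower ud)).contains tag) :=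
    List.filter_congr fun tag _ => pv_set_contains _ tag
  rw [hmt]
  set mt := ktags.filter (fun tag => (PySem.Str.split₀ (PySem.Str.lower ud)).contains tag) with hmtdef
  refine Prod.ext ?_ rfl
  show pvHeadA _ = pvHeadB _
  rw [pv_ts]
  simp only [pv_values_head]
  rw [pv_build_flat]
  have hpe : (PySem.List.enumerate kts 0).flatMap
      (fun p => (pvKw p.2).map (fun wv => (wv.1, p.1, wv.2))) = pvEntries kts := rfl
  rw [hpe]
  have hfun : (fun (sc : List Int) (it : String × List (Int × Int)) =>
      if PySem.Set.contains (PySem.Set.ofList mt) it.1 then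
        it.2.foldl (fun sc pw => PySem.List.pySetD sc pw.1 (PySem.List.pyGetD sc pw.1 0 + pw.2)) sc
      else sc)
    = (fun (sc : List Int) (it : String × List (Int × Int)) =>
      if mt.contains it.1 then
        it.2.foldl (fun sc pw => PySem.List.pySetD sc pw.1 (PySem.List.pyGetD sc pw.1 0 + pw.2)) sc
      else sc) := by
    funext sc it
    rw [pv_set_contains]
  rw [hfun, pv_scores]
  exact pv_headAB (kts.map (pvScore mt))
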